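-- pv_equiv track=rewrite | github.com/wongwaituck/advent-of-code-2020 | 6/solve.py | challenge1
-- ===== SOURCE A (Python) =====
-- def challenge1(l: list[str]) -> list[set[str]]:
--     i = 0
--     sz_l = len(l)
--     out = []
--     while i < sz_l:
--         current_group: set[str] = set([])
--         while i < sz_l and len(l[i]) != 0:
--             chars = set([c for c in l[i]])
--             current_group = current_group.union(chars)
--             i += 1
--         out.append(current_group)
--         i += 1
--     return out
-- ===== SOURCE B (Python) =====
-- def challenge1(l: list[str]) -> list[set[str]]:
--     out: list[set[str]] = []
--     current: set[str] = set()
--     for line in l: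
--         if line:
--             current |= set(line)
--         else:
--             out.append(current)
--             current = set()
--     if current:
--         out.append(current)
--     return out
-- ===== Notes on version B (the rewrite author's own statement) =====
-- stated objective: simpler
-- what changed: Replaces the nested index-driven while loops with a single flat for-loop holding one pending set flushed on each blank line (and once at the end if non-empty); the in-place `current |= set(line)` also avoids A's per-line allocation of a fresh union set.
import Mathlib
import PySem

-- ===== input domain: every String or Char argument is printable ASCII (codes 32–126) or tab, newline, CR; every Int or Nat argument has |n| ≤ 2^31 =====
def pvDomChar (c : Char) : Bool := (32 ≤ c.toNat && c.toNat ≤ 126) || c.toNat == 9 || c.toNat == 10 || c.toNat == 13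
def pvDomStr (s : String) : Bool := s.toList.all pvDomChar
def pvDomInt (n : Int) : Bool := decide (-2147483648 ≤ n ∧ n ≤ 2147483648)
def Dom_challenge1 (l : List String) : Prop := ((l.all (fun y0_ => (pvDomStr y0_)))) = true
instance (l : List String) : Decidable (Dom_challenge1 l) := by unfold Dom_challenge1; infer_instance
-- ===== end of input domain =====

-- B replaces A's nested index-driven while loops by one flat fold that flushes a pending set
-- on each blank line (objective: simpler); same return value, proved equal below.


-- ===== PORT A =====
-- set([c for c in s]) : the characters of s as a set of 1-char strings (used by both Pythons as set(line))
def pvChars (s : String) : PySem.Set String :=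
  PySem.Set.ofList (s.toList.map (fun c => String.mk [c]))

-- inner while loop: consume non-empty lines, unioning their character sets; returns (group, remaining lines)
def pvInnerA : PySem.Set String → List String → PySem.Set String × List String
  | cur, [] => (cur, [])
  | cur, s :: rs =>
    if s.toList.length ≠ 0 then pvInnerA (PySem.Set.union cur (pvChars s)) rs
    else (cur, s :: rs)

theorem pvInnerA_len : ∀ (cur : PySem.Set String) (xs : List String),
    (pvInnerA cur xs).2.length ≤ xs.length := by
  intro cur xs
  induction xs generalizing cur with
  | nil => simp [pvInnerA]
  | cons s rs ih =>
    by_cases h : s.toList.length ≠ 0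
    · rw [pvInnerA, if_pos h]
      exact le_trans (ih _) (Nat.le_succ _)
    · rw [pvInnerA, if_neg h]

-- outer while loop: each iteration runs the inner loop on a fresh empty group, appends it, skips the blank line
def pvOuterA (out : List (List String)) (rest : List String) : List (List String) :=
  match rest with
  | [] => out
  | s :: rs =>
    pvOuterA (out ++ [(pvInnerA PySem.Set.empty (s :: rs)).1])
             (pvInnerA PySem.Set.empty (s :: rs)).2.tail
termination_by rest.length
decreasing_by
  have h := pvInnerA_len PySem.Set.empty (s :: rs)
  simp only [List.length_tail, List.length_cons] at *
  omega

def challenge1 (l : List String) : List (List String) := pvOuterA [] l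

-- ===== PORT B =====
-- one fold step: a non-empty line is unioned into the pending set; a blank line flushes it
def pvStepB (st : List (List String) × PySem.Set String) (s : String) :
    List (List String) × PySem.Set String :=
  if s.toList ≠ [] then (st.1, PySem.Set.union st.2 (pvChars s))
  else (st.1 ++ [st.2], PySem.Set.empty)

def challenge1_alt (l : List String) : List (List String) :=
  let p := l.foldl pvStepB ([], PySem.Set.empty)
  if p.2 ≠ [] then p.1 ++ [p.2] else p.1

-- ===== PRECONDITION & SPEC =====
def Spec_challenge1 (l : List String) (out : List (List String)) : Prop := out = challenge1_alt l
instance (l : List String) (out : List (List String)) : Decidable (Spec_challenge1 l out) := by unfold Spec_challenge1; infer_instance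

-- ===== CLAIM (what is proved, stated in full; the proofs are below) =====
def Claim_equal_challenge1 : Prop := ∀ (l : List String), Dom_challenge1 l → Spec_challenge1 l (challenge1 l)

-- ===== LEMMAS AND PROOFS =====

theorem pvChars_ne_nil {s : String} (h : s.toList ≠ []) : pvChars s ≠ [] := by
  obtain ⟨c, cs, hc⟩ := List.exists_cons_of_ne_nil h
  have : String.mk [c] ∈ pvChars s := by
    unfold pvChars
    rw [PySem.Set.mem_ofList]
    exact List.mem_map_of_mem (by simp [hc])
  exact List.ne_nil_of_mem this

theorem pvUnion_ne_nil {cur t : PySem.Set String} (h : t ≠ []) :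
    PySem.Set.union cur t ≠ [] := by
  obtain ⟨c, cs, hc⟩ := List.exists_cons_of_ne_nil h
  have : c ∈ PySem.Set.union cur t := by
    rw [PySem.Set.mem_union]
    exact Or.inr (by simp [hc])
  exact List.ne_nil_of_mem this

-- the flat fold from any pending state equals A's remaining nested-loop computation
theorem pvKey : ∀ (rest : List String) (cur : PySem.Set String) (out : List (List String)),
    (let p := rest.foldl pvStepB (out, cur); if p.2 ≠ [] then p.1 ++ [p.2] else p.1)
    = (match rest with
       | [] => if cur ≠ [] then out ++ [cur] else out
       | _ :: _ => pvOuterA (out ++ [(pvInnerA cur rest).1]) (pvInnerA cur rest).2.tail) := by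
  intro rest
  induction rest with
  | nil => intro cur out; rfl
  | cons s rs ih =>
    intro cur out
    by_cases h : s.toList = []
    · -- blank line: B flushes cur, A's inner loop stops immediately
      have hstep : pvStepB (out, cur) s = (out ++ [cur], PySem.Set.empty) := by
        simp [pvStepB, h]
      have hinner : pvInnerA cur (s :: rs) = (cur, s :: rs) := by
        rw [pvInnerA, if_neg (by simp [h])]
      show (let p := rs.foldl pvStepB (pvStepB (out, cur) s);
              if p.2 ≠ [] then p.1 ++ [p.2] else p.1)
           = pvOuterA (out ++ [(pvInnerA cur (s :: rs)).1]) (pvInnerA cur (s :: rs)).2.tail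
      rw [hstep, hinner, ih PySem.Set.empty (out ++ [cur])]
      cases rs with
      | nil => simp [pvOuterA, PySem.Set.empty]
      | cons t ts =>
        show _ = pvOuterA (out ++ [cur]) (t :: ts)
        rw [pvOuterA]
    · -- non-empty line: both union its chars into the current set
      have hl : s.toList.length ≠ 0 := by simpa using h
      have hstep : pvStepB (out, cur) s = (out, PySem.Set.union cur (pvChars s)) := by
        simp [pvStepB, h]
      have hinner : pvInnerA cur (s :: rs) = pvInnerA (PySem.Set.union cur (pvChars s)) rs := by
        rw [pvInnerA, if_pos hl]
      show (let p := rs.foldl pvStepB (pvStepB (out, cur) s);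
              if p.2 ≠ [] then p.1 ++ [p.2] else p.1)
           = pvOuterA (out ++ [(pvInnerA cur (s :: rs)).1]) (pvInnerA cur (s :: rs)).2.tail
      rw [hstep, hinner, ih (PySem.Set.union cur (pvChars s)) out]
      cases rs with
      | nil =>
        have hne : PySem.Set.union cur (pvChars s) ≠ [] :=
          pvUnion_ne_nil (pvChars_ne_nil h)
        simp [pvInnerA, pvOuterA, hne]
      | cons t ts => rfl

-- ===== VERDICT (by name: the statement is the Claim_ definition above) =====
theorem challenge1_spec : Claim_equal_challenge1 := by
  intro l _
  unfold Spec_challenge1 challenge1 challenge1_alt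
  rw [pvKey l PySem.Set.empty []]
  cases l with
  | nil => simp [pvOuterA, PySem.Set.empty]
  | cons s rs =>
    show _ = pvOuterA ([] ++ [(pvInnerA PySem.Set.empty (s :: rs)).1])
               (pvInnerA PySem.Set.empty (s :: rs)).2.tail
    rw [pvOuterA]
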